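-- pv_equiv track=rewrite | github.com/yugotakada/FWO-color-code | src/FWO_color_code_488_cond_error.py | reorder_list_len4_elements
-- ===== SOURCE A (Python) =====
-- def reorder_list_len4_elements(input_list):
--     output = []
--     for i in range(0, len(input_list), 4):
--         chunk = input_list[i:i + 4]
--         if len(chunk) == 4:
--             reordered_chunk = [chunk[1], chunk[0], chunk[2], chunk[3]]
--             output.extend(reordered_chunk)
--
--     return output
-- ===== SOURCE B (Python) =====
-- def reorder_list_len4_elements(input_list):
--     m = len(input_list) // 4 * 4
--     perm = [1, 0, 2, 3]
--     return [input_list[(j // 4) * 4 + perm[j % 4]] for j in range(m)]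
-- ===== Notes on version B (the rewrite author's own statement) =====
-- stated objective: alternative
-- what changed: Replaces the chunk-slice-and-reassemble loop with a single flat comprehension over output positions that reads the input through a closed-form index map (chunk base plus a fixed four-entry permutation table), truncating to m = len//4*4.
import Mathlib
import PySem

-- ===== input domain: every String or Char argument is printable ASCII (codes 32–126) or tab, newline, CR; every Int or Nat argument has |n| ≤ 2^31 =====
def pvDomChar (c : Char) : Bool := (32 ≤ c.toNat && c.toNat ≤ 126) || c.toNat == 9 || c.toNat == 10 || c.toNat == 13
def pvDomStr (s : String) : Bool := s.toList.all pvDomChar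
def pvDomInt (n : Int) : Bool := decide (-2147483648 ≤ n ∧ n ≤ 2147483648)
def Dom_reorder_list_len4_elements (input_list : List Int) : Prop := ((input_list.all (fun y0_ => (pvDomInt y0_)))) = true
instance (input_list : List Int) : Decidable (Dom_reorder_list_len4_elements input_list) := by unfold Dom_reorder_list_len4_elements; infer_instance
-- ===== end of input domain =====

-- B replaces A's chunk-slice-and-reassemble loop with one flat comprehension over output
-- positions using the closed-form index map (chunk base plus a fixed permutation table); same O(n) cost.


-- ===== PORT A =====
-- the 'for i in range(0, len(input_list), 4)' loop, with the slice and the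
-- len(chunk)==4 guard, as recursion on the loop index i
def reorder_list_len4_elements_go (input_list : List Int) (i : Nat) : List Int :=
  if _h : i < input_list.length then
    let chunk := PySem.List.slice input_list (some (i : Int)) (some ((i : Int) + 4))
    (if chunk.length = 4 then
      [PySem.List.pyGetD chunk 1 0, PySem.List.pyGetD chunk 0 0,
       PySem.List.pyGetD chunk 2 0, PySem.List.pyGetD chunk 3 0]
     else []) ++ reorder_list_len4_elements_go input_list (i + 4)
  else []
termination_by input_list.length - i

def reorder_list_len4_elements (input_list : List Int) : List Int :=
  reorder_list_len4_elements_go input_list 0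

-- ===== PORT B =====
def reorder_list_len4_elements_alt (input_list : List Int) : List Int :=
  let m : Int := PySem.Int.floordiv (input_list.length : Int) 4 * 4
  let perm : List Int := [1, 0, 2, 3]
  (PySem.List.pyRange 0 m 1).map (fun j =>
    PySem.List.pyGetD input_list
      (PySem.Int.floordiv j 4 * 4 + PySem.List.pyGetD perm (PySem.Int.mod j 4) 0) 0)

-- ===== PRECONDITION & SPEC =====
def Spec_reorder_list_len4_elements (input_list : List Int) (out : List Int) : Prop := out = reorder_list_len4_elements_alt input_list
instance (input_list : List Int) (out : List Int) : Decidable (Spec_reorder_list_len4_elements input_list out) := by unfold Spec_reorder_list_len4_elements; infer_instance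

-- ===== CLAIM (what is proved, stated in full; the proofs are below) =====
def Claim_equal_reorder_list_len4_elements : Prop := ∀ (input_list : List Int), Dom_reorder_list_len4_elements input_list → Spec_reorder_list_len4_elements input_list (reorder_list_len4_elements input_list)

-- ===== LEMMAS AND PROOFS =====

-- common characterisation: swap the first two elements of every complete 4-chunk
def pvChunk4 : List Int → List Int
  | a :: b :: c :: d :: t => b :: a :: c :: d :: pvChunk4 t
  | _ => []

theorem pvChunk4_short (l : List Int) (h : l.length < 4) : pvChunk4 l = [] := by
  match l with
  | [] | [_] | [_, _] | [_, _, _] => rfl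
  | _ :: _ :: _ :: _ :: _ => exact absurd h (by simp)

theorem pvExists4 (l : List Int) (h : 4 ≤ l.length) :
    ∃ a b c d t, l = a :: b :: c :: d :: t := by
  match l with
  | a :: b :: c :: d :: t => exact ⟨a, b, c, d, t, rfl⟩
  | [] | [_] | [_, _] | [_, _, _] => simp at h

theorem pvGo_eq_chunk4 (xs : List Int) (i : Nat) :
    reorder_list_len4_elements_go xs i = pvChunk4 (xs.drop i) := by
  induction i using reorder_list_len4_elements_go.induct xs with
  | case1 i h ih =>
    have hs : PySem.List.slice xs (some (i : Int)) (some ((i : Int) + 4))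
        = (xs.drop i).take 4 := by
      have h4 : ((i : Int) + 4) = ((i + 4 : Nat) : Int) := by push_cast; ring
      rw [h4, PySem.List.slice_natCast]
      congr 1; omega
    rw [reorder_list_len4_elements_go, dif_pos h]
    simp only [hs, ih]
    by_cases h4 : 4 ≤ xs.length - i
    · obtain ⟨a, b, c, d, t, hd⟩ := pvExists4 (xs.drop i) (by simp; omega)
      have hdrop : xs.drop (i + 4) = t := by
        have : xs.drop (i + 4) = (xs.drop i).drop 4 := by rw [List.drop_drop]
        rw [this, hd]; rfl
      rw [hd, hdrop]
      simp [PySem.List.pyGetD, PySem.List.pyGet?, PySem.List.pyIdx?, pvChunk4]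
    · have hlen : ((xs.drop i).take 4).length ≠ 4 := by simp; omega
      rw [if_neg hlen]
      have h1 : (xs.drop (i + 4)).length < 4 := by simp; omega
      have h2 : (xs.drop i).length < 4 := by simp; omega
      rw [pvChunk4_short _ h1, pvChunk4_short _ h2]; rfl
  | case2 i h =>
    rw [reorder_list_len4_elements_go, dif_neg h]
    rw [pvChunk4_short]
    simp; omega

-- B in Nat form
def pvNatB (xs : List Int) : List Int :=
  (List.range (xs.length / 4 * 4)).map
    (fun k => xs.getD (k / 4 * 4 + ([1, 0, 2, 3] : List Nat).getD (k % 4) 0) 0)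

theorem pvAlt_eq_natB (xs : List Int) : reorder_list_len4_elements_alt xs = pvNatB xs := by
  show (let m : Int := PySem.Int.floordiv (xs.length : Int) 4 * 4
        let perm : List Int := [1, 0, 2, 3]
        (PySem.List.pyRange 0 m 1).map (fun j =>
          PySem.List.pyGetD xs
            (PySem.Int.floordiv j 4 * 4 + PySem.List.pyGetD perm (PySem.Int.mod j 4) 0) 0)) = _
  simp only []
  unfold pvNatB
  have hm : PySem.Int.floordiv (xs.length : Int) 4 * 4
      = ((xs.length / 4 * 4 : Nat) : Int) := by
    have : ((4 : Nat) : Int) = (4 : Int) := by norm_num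
    rw [← this, PySem.Int.floordiv_natCast]
    push_cast; ring
  rw [hm, PySem.List.pyRange_zero_natCast, List.map_map]
  apply List.map_congr_left
  intro k _
  simp only [Function.comp]
  have hdiv : PySem.Int.floordiv ((k : Nat) : Int) 4 = ((k / 4 : Nat) : Int) := by
    have h4 : ((4 : Nat) : Int) = (4 : Int) := by norm_num
    rw [← h4, PySem.Int.floordiv_natCast]
  have hmod : PySem.Int.mod ((k : Nat) : Int) 4 = ((k % 4 : Nat) : Int) := by
    have h4 : ((4 : Nat) : Int) = (4 : Int) := by norm_num
    rw [← h4, PySem.Int.mod_natCast]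
  rw [hdiv, hmod]
  have hperm : PySem.List.pyGetD ([1, 0, 2, 3] : List Int) ((k % 4 : Nat) : Int) 0
      = ((([1, 0, 2, 3] : List Nat).getD (k % 4) 0 : Nat) : Int) := by
    have : k % 4 < 4 := Nat.mod_lt _ (by norm_num)
    interval_cases h : k % 4 <;> rfl
  rw [hperm]
  have hidx : ((k / 4 : Nat) : Int) * 4 + ((([1, 0, 2, 3] : List Nat).getD (k % 4) 0 : Nat) : Int)
      = ((k / 4 * 4 + ([1, 0, 2, 3] : List Nat).getD (k % 4) 0 : Nat) : Int) := by
    push_cast; ring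
  rw [hidx, PySem.List.pyGetD_natCast]

theorem pvNatB_eq_chunk4 (xs : List Int) : pvNatB xs = pvChunk4 xs := by
  induction xs using pvChunk4.induct with
  | case1 a b c d t ih =>
    unfold pvNatB at *
    have hlen : (a :: b :: c :: d :: t).length / 4 * 4 = 4 + t.length / 4 * 4 := by
      simp [List.length_cons]; omega
    rw [hlen, List.range_add, List.map_append, List.map_map]
    have h1 : (List.range 4).map
        (fun k => (a :: b :: c :: d :: t).getD (k / 4 * 4 + ([1,0,2,3] : List Nat).getD (k % 4) 0) 0)
        = [b, a, c, d] := by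
      simp [List.range_succ]
    rw [h1]
    have h2 : ∀ k : Nat,
        (a :: b :: c :: d :: t).getD ((4 + k) / 4 * 4 + ([1,0,2,3] : List Nat).getD ((4 + k) % 4) 0) 0
        = t.getD (k / 4 * 4 + ([1,0,2,3] : List Nat).getD (k % 4) 0) 0 := by
      intro k
      have hd : (4 + k) / 4 = k / 4 + 1 := by omega
      have hm4 : (4 + k) % 4 = k % 4 := by omega
      rw [hd, hm4]
      have : (k / 4 + 1) * 4 + ([1,0,2,3] : List Nat).getD (k % 4) 0
          = (k / 4 * 4 + ([1,0,2,3] : List Nat).getD (k % 4) 0) + 4 := by ring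
      rw [this]
      rfl
    have h3 : (List.range (t.length / 4 * 4)).map
        ((fun k => (a :: b :: c :: d :: t).getD (k / 4 * 4 + ([1,0,2,3] : List Nat).getD (k % 4) 0) 0) ∘ (4 + ·))
        = (List.range (t.length / 4 * 4)).map
        (fun k => t.getD (k / 4 * 4 + ([1,0,2,3] : List Nat).getD (k % 4) 0) 0) := by
      apply List.map_congr_left
      intro k _
      simp only [Function.comp]
      exact h2 k
    rw [h3, ih]
    rfl
  | case2 l h =>
    have hlen : l.length < 4 := by
      by_contra hc
      obtain ⟨a, b, c, d, t, hd⟩ := pvExists4 l (Nat.le_of_not_lt hc)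
      exact h a b c d t hd
    have h0 : l.length / 4 * 4 = 0 := by omega
    unfold pvNatB
    rw [h0, pvChunk4_short l hlen]
    rfl

-- ===== VERDICT (by name: the statement is the Claim_ definition above) =====
theorem reorder_list_len4_elements_spec : Claim_equal_reorder_list_len4_elements := by
  intro xs _
  unfold Spec_reorder_list_len4_elements reorder_list_len4_elements
  rw [pvGo_eq_chunk4, pvAlt_eq_natB, pvNatB_eq_chunk4, List.drop_zero]
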